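-- pv_equiv track=rewrite | github.com/ajeseung/Coding_test_practice | 프로그래머스/2/131127. 할인 행사/할인 행사.py | solution
-- ===== SOURCE A (Python) =====
-- from collections import Counter
--
-- def solution(want, number, discount):
--     need = dict(zip(want, number))
--     n = len(discount)
--     if n < 10:
--         return 0
--
--     window = Counter(discount[:10])
--
--     def ok():
--         # 모든 원하는 품목이 필요 수량 이상인지 확인
--         for item, cnt in need.items():
--             if window.get(item, 0) < cnt:
--                 return False
--         return True
--
--     ans = 0
--     if ok():
--         ans += 1
--
--     for i in range(10, n):
--         out_item = discount[i - 10]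
--         in_item = discount[i]
--
--         # 윈도우에서 제거
--         window[out_item] -= 1
--         if window[out_item] == 0:
--             del window[out_item]
--
--         # 윈도우에 추가
--         window[in_item] += 1
--
--         if ok():
--             ans += 1
--
--     return ans
-- ===== SOURCE B (Python) =====
-- def solution(want, number, discount):
--     need = dict(zip(want, number))
--     return sum(
--         all(discount[s:s+10].count(item) >= cnt for item, cnt in need.items())
--         for s in range(len(discount) - 9)
--     )
-- ===== Notes on version B (the rewrite author's own statement) =====
-- stated objective: simpler
-- what changed: A maintains a sliding Counter window with incremental add/remove/delete-at-zero bookkeeping; B has no window state at all: it recounts each wanted item directly in the slice discount[s:s+10] for every start s and sums the booleans in one comprehension.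
import Mathlib
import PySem

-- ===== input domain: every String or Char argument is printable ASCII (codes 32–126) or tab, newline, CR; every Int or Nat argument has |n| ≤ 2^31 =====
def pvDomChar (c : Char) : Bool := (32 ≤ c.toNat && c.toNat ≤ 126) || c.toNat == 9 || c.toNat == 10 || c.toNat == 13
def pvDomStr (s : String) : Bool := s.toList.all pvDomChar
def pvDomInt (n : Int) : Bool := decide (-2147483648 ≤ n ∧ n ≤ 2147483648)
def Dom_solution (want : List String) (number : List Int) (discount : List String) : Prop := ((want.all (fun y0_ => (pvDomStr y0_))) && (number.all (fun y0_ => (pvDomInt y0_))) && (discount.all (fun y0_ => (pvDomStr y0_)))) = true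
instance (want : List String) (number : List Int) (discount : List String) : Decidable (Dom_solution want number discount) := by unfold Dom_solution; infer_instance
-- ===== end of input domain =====

-- B drops A's incrementally maintained sliding Counter and instead recounts each wanted
-- item in every length-10 slice directly, summing the booleans — simpler, not faster.

-- ===== PORT A =====
-- the inner helper ok(): every wanted item present in the window in at least the needed quantity
def solOk (need window : PySem.Dict String Int) : Bool :=
  need.items.all (fun p => !(decide (window.getD p.1 0 < p.2)))

-- one iteration of A's sliding-window loop body (state = (window, ans))
def solStep (need : PySem.Dict String Int) (discount : List String)
    (st : PySem.Dict String Int × Int) (i : Int) : PySem.Dict String Int × Int :=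
  let out_item := PySem.List.pyGetD discount (i - 10) ""
  let in_item := PySem.List.pyGetD discount i ""
  let w1 := st.1.modify out_item 0 (· - 1)
  let w2 := if w1.getD out_item 0 == 0 then w1.erase out_item else w1
  let w3 := w2.modify in_item 0 (· + 1)
  (w3, if solOk need w3 then st.2 + 1 else st.2)

def solution (want : List String) (number : List Int) (discount : List String) : Int :=
  let need := PySem.Dict.ofList (want.zip number)
  let n : Int := discount.length
  if n < 10 then 0
  else
    let window := PySem.Dict.counter (PySem.List.slice discount none (some 10))
    let ans : Int := if solOk need window then 1 else 0
    ((PySem.List.pyRange 10 n 1).foldl (solStep need discount) (window, ans)).2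

-- ===== PORT B =====
-- B's window test: count each wanted item directly in the slice
def bOk (need : PySem.Dict String Int) (xs : List String) : Bool :=
  need.items.all (fun p => decide (((xs.count p.1 : Int)) ≥ p.2))

def solution_alt (want : List String) (number : List Int) (discount : List String) : Int :=
  let need := PySem.Dict.ofList (want.zip number)
  (PySem.List.pyRange 0 ((discount.length : Int) - 9) 1).foldl
    (fun acc s =>
      acc + (if bOk need (PySem.List.slice discount (some s) (some (s + 10))) then 1 else 0)) 0

-- ===== PRECONDITION & SPEC =====
def Spec_solution (want : List String) (number : List Int) (discount : List String) (out : Int) : Prop := out = solution_alt want number discount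
instance (want : List String) (number : List Int) (discount : List String) (out : Int) : Decidable (Spec_solution want number discount out) := by unfold Spec_solution; infer_instance

-- ===== CLAIM (what is proved, stated in full; the proofs are below) =====
def Claim_equal_solution : Prop := ∀ (want : List String) (number : List Int) (discount : List String), Dom_solution want number discount → Spec_solution want number discount (solution want number discount)

-- ===== LEMMAS AND PROOFS =====

-- Dict.erase removes every entry for the key (it filters), so lookups after erase:
theorem pv_find?_filter_self (l : List (String × Int)) (k : String) :
    (l.filter (fun p => !(p.1 == k))).find? (fun p => p.1 == k) = none := by
  induction l with
  | nil => simp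
  | cons p t ih =>
    by_cases h : p.1 = k <;> simp [h, ih]

theorem pv_find?_filter_ne (l : List (String × Int)) (k k' : String) (h : k' ≠ k) :
    (l.filter (fun p => !(p.1 == k))).find? (fun p => p.1 == k') =
      l.find? (fun p => p.1 == k') := by
  induction l with
  | nil => simp
  | cons p t ih =>
    by_cases h1 : p.1 = k
    · have h2 : ¬ p.1 = k' := by rw [h1]; exact fun e => h e.symm
      simp [h1, Ne.symm h, ih]
    · by_cases h2 : p.1 = k' <;> simp [h1, h2, h, ih]

theorem pv_getD_erase (d : PySem.Dict String Int) (k k' : String) (d0 : Int) :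
    (d.erase k).getD k' d0 = if k' = k then d0 else d.getD k' d0 := by
  by_cases h : k' = k
  · subst h
    have hf := pv_find?_filter_self d.items k'
    rw [if_pos rfl]
    simp only [PySem.Dict.erase, PySem.Dict.getD, PySem.Dict.get?, hf]
    rfl
  · rw [if_neg h]
    simp only [PySem.Dict.erase, PySem.Dict.getD, PySem.Dict.get?,
      pv_find?_filter_ne d.items k k' h]

-- A's ok() equals B's recount test whenever the window represents the slice's counts
theorem pv_solOk_eq (need w : PySem.Dict String Int) (xs : List String)
    (h : ∀ k, w.getD k 0 = (xs.count k : Int)) : solOk need w = bOk need xs := by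
  unfold solOk bOk
  refine List.all_congr rfl ?_
  intro p
  rw [h p.1, ← decide_not]
  exact decide_eq_decide.mpr (by omega)

-- one window step: from a window representing out :: mid to one representing mid ++ [inn]
theorem pv_window_step (w : PySem.Dict String Int) (out inn : String) (mid : List String)
    (hw : ∀ k, w.getD k 0 = ((out :: mid).count k : Int)) :
    ∀ k, ((if (w.modify out 0 (· - 1)).getD out 0 == 0
              then (w.modify out 0 (· - 1)).erase out
              else w.modify out 0 (· - 1)).modify inn 0 (· + 1)).getD k 0
        = ((mid ++ [inn]).count k : Int) := by
  intro k
  have h1 : ∀ j, (w.modify out 0 (· - 1)).getD j 0 = (mid.count j : Int) := by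
    intro j
    rw [PySem.Dict.getD_modify]
    by_cases hj : j = out
    · subst hj
      rw [if_pos rfl, hw j]
      simp
    · rw [if_neg hj, hw j]
      have : out ≠ j := fun e => hj e.symm
      simp [this]
  have hmid : ∀ j, (if (w.modify out 0 (· - 1)).getD out 0 == 0
      then (w.modify out 0 (· - 1)).erase out
      else w.modify out 0 (· - 1)).getD j 0 = (mid.count j : Int) := by
    intro j
    by_cases hz : ((w.modify out 0 (· - 1)).getD out 0 == 0) = true
    · rw [if_pos hz, pv_getD_erase]
      by_cases hj : j = out
      · rw [if_pos hj]
        subst hj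
        rw [h1 j] at hz
        simp at hz
        omega
      · rw [if_neg hj, h1 j]
    · rw [if_neg (by simpa using hz), h1 j]
  rw [PySem.Dict.getD_modify]
  by_cases hk : k = inn
  · subst hk
    rw [if_pos rfl, hmid k]
    simp [List.count_append]
  · rw [if_neg hk, hmid k]
    have : inn ≠ k := fun e => hk e.symm
    simp [List.count_append, this]

-- the slice discount[j : j+10] as drop/take, for integer j ≥ 0
theorem pv_slice_window (discount : List String) (j : Int) (hj : 0 ≤ j) :
    PySem.List.slice discount (some j) (some (j + 10)) =
      (discount.drop j.toNat).take 10 := by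
  rw [PySem.List.slice_toNat discount hj (by omega)]
  congr 1
  omega

-- consecutive windows: head-decomposition of the old one, last-decomposition of the new one
theorem pv_old_window (discount : List String) (j : Nat) (h : j + 10 ≤ discount.length) :
    (discount.drop j).take 10 = discount[j] :: ((discount.drop (j + 1)).take 9) := by
  rw [List.drop_eq_getElem_cons (by omega)]
  rfl

theorem pv_new_window (discount : List String) (j : Nat) (h : j + 10 ≤ discount.length) :
    (discount.drop j).take 10 = ((discount.drop j).take 9) ++ [discount[j + 9]] := by
  have h9 : 9 < (discount.drop j).length := by simp; omega
  rw [show (10 : Nat) = 9 + 1 from rfl, List.take_add_one]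
  simp [List.getElem?_eq_getElem h9, List.getElem_drop]
  rfl

-- the two components of one step of A's loop, as plain equations
theorem pv_solStep_fst (need : PySem.Dict String Int) (discount : List String)
    (st : PySem.Dict String Int × Int) (i : Int) :
    (solStep need discount st i).1 =
      ((if (st.1.modify (PySem.List.pyGetD discount (i - 10) "") 0 (· - 1)).getD
            (PySem.List.pyGetD discount (i - 10) "") 0 == 0
          then (st.1.modify (PySem.List.pyGetD discount (i - 10) "") 0 (· - 1)).erase
            (PySem.List.pyGetD discount (i - 10) "")
          else st.1.modify (PySem.List.pyGetD discount (i - 10) "") 0 (· - 1)).modify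
        (PySem.List.pyGetD discount i "") 0 (· + 1)) := rfl

theorem pv_solStep_snd (need : PySem.Dict String Int) (discount : List String)
    (st : PySem.Dict String Int × Int) (i : Int) :
    (solStep need discount st i).2 =
      if solOk need (solStep need discount st i).1 then st.2 + 1 else st.2 := rfl

-- loop invariant: A's remaining fold equals B's fold over the remaining window starts
theorem pv_loop (need : PySem.Dict String Int) (discount : List String) (n : Int)
    (hn : n = (discount.length : Int)) :
    ∀ (m : Nat) (i : Int) (w : PySem.Dict String Int) (a : Int),
      10 ≤ i → i ≤ n → (n - i).toNat = m →
      (∀ k, w.getD k 0 = ((PySem.List.slice discount (some (i - 10)) (some i)).count k : Int)) →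
      ((PySem.List.pyRange i n 1).foldl (solStep need discount) (w, a)).2 =
        (PySem.List.pyRange (i - 9) (n - 9) 1).foldl
          (fun acc s =>
            acc + (if bOk need (PySem.List.slice discount (some s) (some (s + 10))) then 1 else 0)) a := by
  intro m
  induction m with
  | zero =>
    intro i w a h10 hin hm hw
    have hie : i = n := by omega
    rw [hie, PySem.List.pyRange_one_eq_nil (le_refl n), PySem.List.pyRange_one_eq_nil (by omega)]
    rfl
  | succ m ih =>
    intro i w a h10 hin hm hw
    have hilt : i < n := by omega
    rw [PySem.List.pyRange_one_cons hilt,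
      PySem.List.pyRange_one_cons (show i - 9 < n - 9 by omega)]
    simp only [List.foldl_cons]
    have hjn : (i - 10).toNat + 10 ≤ discount.length := by omega
    have hj1n : (i - 9).toNat + 10 ≤ discount.length := by omega
    have hmid1 : (i - 10).toNat + 1 = (i - 9).toNat := by omega
    have e2 : i + 1 - 10 = i - 9 := by ring
    have e3 : i + 1 = i - 9 + 10 := by ring
    -- old window = out :: mid
    have hold : PySem.List.slice discount (some (i - 10)) (some i) =
        discount[(i - 10).toNat] :: ((discount.drop ((i - 10).toNat + 1)).take 9) := by
      have e : i - 10 + 10 = i := by ring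
      have hs := pv_slice_window discount (i - 10) (by omega)
      rw [e] at hs
      rw [hs]
      exact pv_old_window discount (i - 10).toNat hjn
    -- new window = mid ++ [inn]
    have hnew : PySem.List.slice discount (some (i - 9)) (some (i - 9 + 10)) =
        ((discount.drop ((i - 9).toNat)).take 9) ++ [discount[(i - 9).toNat + 9]] := by
      rw [pv_slice_window discount (i - 9) (by omega)]
      exact pv_new_window discount (i - 9).toNat hj1n
    have hgetout : PySem.List.pyGetD discount (i - 10) "" = discount[(i - 10).toNat] := by
      rw [PySem.List.pyGetD_eq_getElem discount "" (by omega) (by omega)]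
    have hgetin : PySem.List.pyGetD discount i "" = discount[(i - 9).toNat + 9] := by
      rw [PySem.List.pyGetD_eq_getElem discount "" (by omega) (by omega)]
      congr 1
      omega
    -- after the step, the window represents the new slice
    have hw' : ∀ k, (solStep need discount (w, a) i).1.getD k 0 =
        ((PySem.List.slice discount (some (i - 9)) (some (i - 9 + 10))).count k : Int) := by
      intro k
      rw [pv_solStep_fst, hgetout, hgetin, hnew]
      exact pv_window_step w _ _ _ (fun k' => by rw [hw k', hold, hmid1]) k
    have hwin2 : (solStep need discount (w, a) i).2 =
        a + (if bOk need (PySem.List.slice discount (some (i - 9)) (some ((i - 9) + 10))) then 1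
          else 0) := by
      rw [pv_solStep_snd, pv_solOk_eq need _ _ hw']
      by_cases hb :
        bOk need (PySem.List.slice discount (some (i - 9)) (some (i - 9 + 10))) <;> simp [hb]
    have hw'' : ∀ k, (solStep need discount (w, a) i).1.getD k 0 =
        ((PySem.List.slice discount (some (i + 1 - 10)) (some (i + 1))).count k : Int) := by
      intro k
      rw [e2, e3]
      exact hw' k
    have hih := ih (i + 1) (solStep need discount (w, a) i).1 (solStep need discount (w, a) i).2
      (by omega) (by omega) (by omega) hw''
    rw [show (solStep need discount (w, a) i) =
      ((solStep need discount (w, a) i).1, (solStep need discount (w, a) i).2) from rfl, hih,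
      hwin2, show i + 1 - 9 = (i - 9) + 1 by ring]

-- ===== VERDICT (by name: the statement is the Claim_ definition above) =====
theorem solution_spec : Claim_equal_solution := by
  intro want number discount _
  unfold Spec_solution solution solution_alt
  simp only []
  set need := PySem.Dict.ofList (want.zip number) with hneed
  by_cases hlen : (discount.length : Int) < 10
  · rw [if_pos hlen, PySem.List.pyRange_one_eq_nil (by omega)]
    rfl
  · rw [if_neg hlen]
    have hw0 : ∀ k, (PySem.Dict.counter (PySem.List.slice discount none (some 10))).getD k 0 =
        ((PySem.List.slice discount (some ((10:Int) - 10)) (some (10:Int))).count k : Int) := by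
      intro k
      rw [PySem.Dict.getD_counter, show ((10:Int) - 10) = (0:Int) from by ring,
        PySem.List.slice_zero_start]
    have hok0 : solOk need (PySem.Dict.counter (PySem.List.slice discount none (some 10))) =
        bOk need (PySem.List.slice discount (some (0:Int)) (some ((0:Int) + 10))) := by
      apply pv_solOk_eq
      intro k
      rw [PySem.Dict.getD_counter]
      congr 2
    have hmain := pv_loop need discount (discount.length : Int) rfl
      ((discount.length : Int) - 10).toNat 10
      (PySem.Dict.counter (PySem.List.slice discount none (some 10)))
      (if solOk need (PySem.Dict.counter (PySem.List.slice discount none (some 10))) then 1 else 0)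
      (le_refl 10) (by omega) (by omega) hw0
    rw [hmain, PySem.List.pyRange_one_cons
      (show (0:Int) < (discount.length : Int) - 9 by omega)]
    simp only [List.foldl_cons]
    rw [hok0, show (10:Int) - 9 = 0 + 1 by ring]
    simp
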